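-- pv_equiv track=rewrite | github.com/J-Mara/hex | hex_tester.py | earliest_win_bfs
-- ===== SOURCE A (Python) =====
-- from typing import List, Tuple, Optional, Set, Iterable
--
-- Coord = Tuple[int, int]
--
-- NEIGHBORS = [(-1, 0), (-1, 1), (0, -1), (0, 1), (1, -1), (1, 0)]
--
-- def in_bounds(n: int, r: int, c: int) -> bool:
--     return 0 <= r < n and 0 <= c < n
--
-- def neighbors(n: int, r: int, c: int) -> Iterable[Coord]:
--     for dr, dc in NEIGHBORS:
--         nr, nc = r + dr, c + dc
--         if in_bounds(n, nr, nc):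
--             yield (nr, nc)
--
-- def earliest_win_bfs(n: int, moves: List[Coord]) -> Tuple[Optional[str], Optional[int]]:
--     """
--     Independently verifies the game by checking, after each move i,
--     whether the player who just moved has formed a connecting path.
--     Returns ('Black'/'White'/None, move_index or None).
--     """
--     board = [[None] * n for _ in range(n)]  # 'B','W', or None
--
--     def has_connection(color: str) -> bool:
--         from collections import deque
--
--         visited: Set[Coord] = set()
--         q = deque()
--
--         if color == 'B':
--             # start frontier: all Black stones on top edge
--             for c in range(n):
--                 if board[0][c] == 'B':
--                     q.append((0, c))
--                     visited.add((0, c))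
--             # target: reach any bottom row
--             target_row = n - 1
--             while q:
--                 r, c = q.popleft()
--                 if r == target_row:
--                     return True
--                 for nr, nc in neighbors(n, r, c):
--                     if (nr, nc) not in visited and board[nr][nc] == 'B':
--                         visited.add((nr, nc))
--                         q.append((nr, nc))
--             return False
--
--         else:  # 'W'
--             # start frontier: all White stones on left edge
--             for r in range(n):
--                 if board[r][0] == 'W':
--                     q.append((r, 0))
--                     visited.add((r, 0))
--             # target: reach any rightmost column
--             target_col = n - 1
--             while q:
--                 r, c = q.popleft()
--                 if c == target_col:
--                     return True
--                 for nr, nc in neighbors(n, r, c):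
--                     if (nr, nc) not in visited and board[nr][nc] == 'W':
--                         visited.add((nr, nc))
--                         q.append((nr, nc))
--             return False
--
--     for i, (r, c) in enumerate(moves, start=1):
--         color = 'B' if i % 2 == 1 else 'W'
--         if not in_bounds(n, r, c) or board[r][c] is not None:
--             raise ValueError(f"Invalid move {i}: {(r, c)}")
--         board[r][c] = color
--
--         # Check if the just-moved player has a connection
--         if has_connection(color):
--             return ('Black' if color == 'B' else 'White', i)
--
--     return (None, None)
-- ===== SOURCE B (Python) =====
-- from typing import List, Tuple, Optional
--
-- Coord = Tuple[int, int]
--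
-- NEIGHBORS = [(-1, 0), (-1, 1), (0, -1), (0, 1), (1, -1), (1, 0)]
--
--
-- def earliest_win_bfs(n: int, moves: List[Coord]) -> Tuple[Optional[str], Optional[int]]:
--     """Validate the whole record up front, then replay it; after each move run a
--     single depth-first search from the stone just placed and declare a win as
--     soon as that stone's component touches both of its player's edges."""
--     seen_moves = set()
--     for i, (r, c) in enumerate(moves, start=1):
--         if not (0 <= r < n and 0 <= c < n) or (r, c) in seen_moves:
--             raise ValueError(f"Invalid move {i}: {(r, c)}")
--         seen_moves.add((r, c))
--
--     board = {}
--     for i, (r, c) in enumerate(moves, start=1):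
--         color = 'B' if i % 2 == 1 else 'W'
--         board[(r, c)] = color
--         lo = hi = False          # component touches the near / far edge
--         stack = [(r, c)]
--         comp = {(r, c)}
--         while stack:
--             x, y = stack.pop()
--             k = x if color == 'B' else y
--             if k == 0:
--                 lo = True
--             if k == n - 1:
--                 hi = True
--             for dx, dy in NEIGHBORS:
--                 p = (x + dx, y + dy)
--                 if p not in comp and board.get(p) == color:
--                     comp.add(p)
--                     stack.append(p)
--         if lo and hi:
--             return ('Black' if color == 'B' else 'White', i)
--     return (None, None)
-- ===== Notes on version B (the rewrite author's own statement) =====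
-- stated objective: alternative
-- what changed: Instead of re-running a breadth-first search from a whole edge frontier after every move, B validates the record once up front and, after each move, runs a single depth-first search only from the stone just placed, checking whether that stone's component touches both of its player's edges.
-- outside the precondition, e.g. on earliest_win_bfs(1, [(0, 0), (1, 1)]): A returns ('Black', 1), B raises ValueError
import Mathlib
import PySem

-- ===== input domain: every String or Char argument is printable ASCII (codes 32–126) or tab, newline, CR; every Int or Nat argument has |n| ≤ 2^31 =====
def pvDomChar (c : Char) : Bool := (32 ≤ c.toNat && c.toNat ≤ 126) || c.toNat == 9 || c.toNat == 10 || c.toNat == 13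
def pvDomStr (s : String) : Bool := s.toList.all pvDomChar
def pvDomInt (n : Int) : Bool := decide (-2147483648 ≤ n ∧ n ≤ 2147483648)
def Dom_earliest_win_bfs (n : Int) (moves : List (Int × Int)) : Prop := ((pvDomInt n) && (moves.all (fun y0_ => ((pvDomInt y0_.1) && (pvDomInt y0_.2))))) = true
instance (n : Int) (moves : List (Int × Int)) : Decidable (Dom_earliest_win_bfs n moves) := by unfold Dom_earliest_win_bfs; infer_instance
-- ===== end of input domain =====

-- B replaces the per-move edge-to-edge BFS by one up-front validation pass plus, per move, a single
-- DFS from the stone just placed checking that its component touches both of its player's edges;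
-- it is proved to return A's exact value on every valid move record.

-- ===== PORT A =====

-- NEIGHBORS
def pvDeltas : List (Int × Int) := [(-1, 0), (-1, 1), (0, -1), (0, 1), (1, -1), (1, 0)]

-- in_bounds
def pvInBounds (n r c : Int) : Bool := decide (0 ≤ r ∧ r < n ∧ 0 ≤ c ∧ c < n)

-- neighbors (the generator, collected into the list of yielded coordinates)
def pvNeighbors (n r c : Int) : List (Int × Int) :=
  pvDeltas.foldl (fun acc d =>
    if pvInBounds n (r + d.1) (c + d.2) then acc ++ [(r + d.1, c + d.2)] else acc) []

-- board: list of n rows of n cells, each 'B'/'W'/None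
-- board[r][c] (only read at indices the Python has bounds-checked; out of range gives none)
def pvAGet (b : List (List (Option String))) (r c : Int) : Option String :=
  ((PySem.List.pyGet? b r).bind (fun row => PySem.List.pyGet? row c)).join

-- board[r][c] = v (the Python only assigns after in_bounds, so 0 ≤ r, c)
def pvASet (b : List (List (Option String))) (r c : Int) (v : Option String) :
    List (List (Option String)) :=
  b.modify r.toNat (fun row => row.set c.toNat v)

-- the 'while q:' BFS loop of has_connection; the two textually duplicated Python loops differ only
-- in the color and in which coordinate is compared to n-1 (useRow = true for 'B').
-- fuel is an artifact for totality: it only ever decreases bounded by pops ≤ n*n + n (proved below).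
def pvBfsLoop (n : Int) (board : List (List (Option String))) (color : String) (useRow : Bool) :
    Nat → PySem.Set (Int × Int) → List (Int × Int) → Bool
  | 0, _, _ => false
  | fuel + 1, visited, q =>
    match q with
    | [] => false
    | (r, c) :: rest =>
      if (if useRow then r else c) = n - 1 then true
      else
        let st := (pvNeighbors n r c).foldl
          (fun (st : PySem.Set (Int × Int) × List (Int × Int)) p =>
            if p ∉ st.1 ∧ pvAGet board p.1 p.2 = some color then
              (PySem.Set.add st.1 p, st.2 ++ [p])
            else st) (visited, rest)
        pvBfsLoop n board color useRow fuel st.1 st.2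

def pvFuelA (n : Int) : Nat := n.toNat * n.toNat + n.toNat + 1

-- has_connection
def pvHasConnection (n : Int) (board : List (List (Option String))) (color : String) : Bool :=
  if color = "B" then
    let init := (PySem.List.pyRange 0 n 1).foldl
      (fun (st : PySem.Set (Int × Int) × List (Int × Int)) c =>
        if pvAGet board 0 c = some "B" then (PySem.Set.add st.1 (0, c), st.2 ++ [(0, c)]) else st)
      (PySem.Set.empty, [])
    pvBfsLoop n board "B" true (pvFuelA n) init.1 init.2
  else
    let init := (PySem.List.pyRange 0 n 1).foldl
      (fun (st : PySem.Set (Int × Int) × List (Int × Int)) r =>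
        if pvAGet board r 0 = some "W" then (PySem.Set.add st.1 (r, 0), st.2 ++ [(r, 0)]) else st)
      (PySem.Set.empty, [])
    pvBfsLoop n board "W" false (pvFuelA n) init.1 init.2

-- the main 'for i, (r, c) in enumerate(moves, start=1)' loop; on an invalid move the Python raises
-- ValueError (excluded by Pre_): the port returns (none, none) there.
def pvLoopA (n : Int) (board : List (List (Option String))) (i : Int) :
    List (Int × Int) → Option String × Option Int
  | [] => (none, none)
  | (r, c) :: rest =>
    let color := if PySem.Int.mod i 2 = 1 then "B" else "W"
    if ¬ (pvInBounds n r c = true) ∨ pvAGet board r c ≠ none then (none, none)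
    else
      let board' := pvASet board r c (some color)
      if pvHasConnection n board' color then
        ((if color = "B" then some "Black" else some "White"), some i)
      else pvLoopA n board' (i + 1) rest

def earliest_win_bfs (n : Int) (moves : List (Int × Int)) : Option String × Option Int :=
  pvLoopA n (List.replicate n.toNat (List.replicate n.toNat none)) 1 moves

-- ===== PORT B =====

-- B's up-front validation pass ('raise ValueError' = false, excluded by Pre_)
def pvValid (n : Int) : PySem.Set (Int × Int) → List (Int × Int) → Bool
  | _, [] => true
  | seen, (r, c) :: rest =>
    if ¬ (pvInBounds n r c = true) ∨ (r, c) ∈ seen then false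
    else pvValid n (PySem.Set.add seen (r, c)) rest

-- B's 'while stack:' DFS loop; Python's stack.pop() pops the LAST element.
-- fuel is an artifact for totality (pops ≤ number of stones, proved below).
def pvDfsLoop (n : Int) (board : PySem.Dict (Int × Int) String) (color : String) :
    Nat → PySem.Set (Int × Int) → List (Int × Int) → Bool → Bool → Bool × Bool
  | 0, _, _, lo, hi => (lo, hi)
  | fuel + 1, comp, stack, lo, hi =>
    match stack.getLast? with
    | none => (lo, hi)
    | some (x, y) =>
      let rest := stack.dropLast
      let k := if color = "B" then x else y
      let lo := lo || decide (k = 0)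
      let hi := hi || decide (k = n - 1)
      let st := pvDeltas.foldl
        (fun (st : PySem.Set (Int × Int) × List (Int × Int)) d =>
          if (x + d.1, y + d.2) ∉ st.1 ∧ board.get? (x + d.1, y + d.2) = some color then
            (PySem.Set.add st.1 (x + d.1, y + d.2), st.2 ++ [(x + d.1, y + d.2)])
          else st) (comp, rest)
      pvDfsLoop n board color fuel st.1 st.2 lo hi

-- B's replay loop; fl is the totality fuel handed to each DFS (moves.length + 1 at the top call)
def pvLoopB (n : Int) (fl : Nat) (board : PySem.Dict (Int × Int) String) (i : Int) :
    List (Int × Int) → Option String × Option Int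
  | [] => (none, none)
  | (r, c) :: rest =>
    let color := if PySem.Int.mod i 2 = 1 then "B" else "W"
    let board' := board.insert (r, c) color
    let flags := pvDfsLoop n board' color fl (PySem.Set.add PySem.Set.empty (r, c)) [(r, c)] false false
    if flags.1 && flags.2 then
      ((if color = "B" then some "Black" else some "White"), some i)
    else pvLoopB n fl board' (i + 1) rest

def earliest_win_bfs_alt (n : Int) (moves : List (Int × Int)) : Option String × Option Int :=
  if pvValid n PySem.Set.empty moves then
    pvLoopB n (moves.length + 1) PySem.Dict.empty 1 moves
  else (none, none)   -- Python raises ValueError here (excluded by Pre_)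

-- ===== PRECONDITION & SPEC =====
-- Pre_ excludes the records containing an out-of-bounds or repeated move: A raises ValueError on
-- them unless a win occurs first, in which case A still returns while B (which validates the whole
-- record up front) raises; both behaviours are defensible for an invalid record.
def Pre_earliest_win_bfs (n : Int) (moves : List (Int × Int)) : Prop :=
  moves.Nodup ∧ ∀ p ∈ moves, 0 ≤ p.1 ∧ p.1 < n ∧ 0 ≤ p.2 ∧ p.2 < n

instance (n : Int) (moves : List (Int × Int)) : Decidable (Pre_earliest_win_bfs n moves) := by
  unfold Pre_earliest_win_bfs; infer_instance

def pvWitness_earliest_win_bfs : Int × (List (Int × Int)) := (2, [(0, 0), (1, 1), (1, 0)])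

def Spec_earliest_win_bfs (n : Int) (moves : List (Int × Int)) (out : Option String × Option Int) : Prop := out = earliest_win_bfs_alt n moves
instance (n : Int) (moves : List (Int × Int)) (out : Option String × Option Int) : Decidable (Spec_earliest_win_bfs n moves out) := by unfold Spec_earliest_win_bfs; infer_instance

-- ===== CLAIM (what is proved, stated in full; the proofs are below) =====
def Claim_equal_earliest_win_bfs : Prop := ∀ (n : Int) (moves : List (Int × Int)), Dom_earliest_win_bfs n moves → Pre_earliest_win_bfs n moves → Spec_earliest_win_bfs n moves (earliest_win_bfs n moves)

-- ===== LEMMAS AND PROOFS =====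

-- ---- semantic layer: hex adjacency, induced-subgraph connectivity, reachability ----

def pvAdj (p q : Int × Int) : Prop := (q.1 - p.1, q.2 - p.2) ∈ pvDeltas

-- connectivity inside the set of cells satisfying `good`
inductive pvP (good : Int × Int → Prop) : Int × Int → Int × Int → Prop
  | refl : ∀ p, good p → pvP good p p
  | tail : ∀ {a b c}, pvP good a b → pvAdj b c → good c → pvP good a c

-- reachability from a start set S inside `good` (S itself is assumed ⊆ good where used)
inductive pvReach (good S : Int × Int → Prop) : Int × Int → Prop
  | base : ∀ p, S p → pvReach good S p
  | step : ∀ {p q}, pvReach good S p → pvAdj p q → good q → pvReach good S q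

def pvSel (useRow : Bool) (p : Int × Int) : Int := if useRow then p.1 else p.2

def pvGoodD (d : PySem.Dict (Int × Int) String) (color : String) (p : Int × Int) : Prop :=
  d.get? p = some color

def pvGoodA (n : Int) (board : List (List (Option String))) (color : String) (p : Int × Int) : Prop :=
  pvInBounds n p.1 p.2 = true ∧ pvAGet board p.1 p.2 = some color

-- a winning connection for the player whose edges are selected by useRow
def pvConn (n : Int) (useRow : Bool) (good : Int × Int → Prop) : Prop :=
  ∃ s x, pvSel useRow s = 0 ∧ pvSel useRow x = n - 1 ∧ pvP good s x

def pvWF (n : Int) (board : List (List (Option String))) : Prop :=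
  board.length = n.toNat ∧ ∀ row ∈ board, row.length = n.toNat

lemma pvAdj_symm {p q : Int × Int} (h : pvAdj p q) : pvAdj q p := by
  simp only [pvAdj, pvDeltas] at h ⊢
  simp only [List.mem_cons, List.not_mem_nil, or_false, Prod.ext_iff] at h ⊢
  omega

lemma pvP_good_left {good} {a b : Int × Int} (h : pvP good a b) : good a := by
  induction h with
  | refl hp => exact hp
  | tail _ _ _ ih => exact ih

lemma pvP_good_right {good} {a b : Int × Int} (h : pvP good a b) : good b := by
  cases h with
  | refl hp => exact hp
  | tail _ _ hc => exact hc

lemma pvP_trans {good} {a b c : Int × Int} (h1 : pvP good a b) (h2 : pvP good b c) :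
    pvP good a c := by
  induction h2 with
  | refl hp => exact h1
  | tail _ hadj hc ih => exact pvP.tail ih hadj hc

lemma pvP_symm {good} {a b : Int × Int} (h : pvP good a b) : pvP good b a := by
  induction h with
  | refl hp => exact pvP.refl _ hp
  | tail hab hadj hc ih =>
    exact pvP_trans (pvP.tail (pvP.refl _ hc) (pvAdj_symm hadj) (pvP_good_right hab)) ih

lemma pvP_mono {good good'} (hm : ∀ x, good x → good' x) {a b : Int × Int}
    (h : pvP good a b) : pvP good' a b := by
  induction h with
  | refl hp => exact pvP.refl _ (hm _ hp)
  | tail _ hadj hc ih => exact pvP.tail ih hadj (hm _ hc)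

lemma pvConn_congr {n useRow} {good good'} (h : ∀ x, good x ↔ good' x) :
    pvConn n useRow good ↔ pvConn n useRow good' := by
  constructor
  · rintro ⟨s, x, h0, h1, hp⟩
    exact ⟨s, x, h0, h1, pvP_mono (fun z hz => (h z).mp hz) hp⟩
  · rintro ⟨s, x, h0, h1, hp⟩
    exact ⟨s, x, h0, h1, pvP_mono (fun z hz => (h z).mpr hz) hp⟩

lemma pvReach_iff {good S} (hS : ∀ p, S p → good p) (x : Int × Int) :
    pvReach good S x ↔ ∃ s, S s ∧ pvP good s x := by
  constructor
  · intro h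
    induction h with
    | base p hp => exact ⟨p, hp, pvP.refl p (hS p hp)⟩
    | step _ hadj hg ih =>
      obtain ⟨s, hs, hps⟩ := ih
      exact ⟨s, hs, pvP.tail hps hadj hg⟩
  · rintro ⟨s, hs, hps⟩
    induction hps with
    | refl hp => exact pvReach.base _ hs
    | tail _ hadj hc ih => exact pvReach.step ih hadj hc

lemma pvReach_subset_closed {good S} {visited : List (Int × Int)}
    (hSv : ∀ p, S p → p ∈ visited)
    (hcl : ∀ p ∈ visited, ∀ q, pvAdj p q → good q → q ∈ visited) :
    ∀ x, pvReach good S x → x ∈ visited := by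
  intro x hx
  induction hx with
  | base p hp => exact hSv p hp
  | step hr hadj hg ih => exact hcl _ ih _ hadj hg

lemma mem_pvNeighbors {n r c : Int} {p : Int × Int} :
    p ∈ pvNeighbors n r c ↔ pvAdj (r, c) p ∧ pvInBounds n p.1 p.2 = true := by
  unfold pvNeighbors
  rw [PySem.List.foldl_append_if]
  simp only [List.nil_append, List.mem_map, List.mem_filter]
  constructor
  · rintro ⟨d, ⟨hd, hb⟩, rfl⟩
    refine ⟨?_, hb⟩
    simpa [pvAdj] using hd
  · rintro ⟨ha, hb⟩
    refine ⟨(p.1 - r, p.2 - c), ⟨ha, ?_⟩, ?_⟩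
    · have h1 : r + (p.1 - r) = p.1 := by ring
      have h2 : c + (p.2 - c) = p.2 := by ring
      rw [h1, h2]; exact hb
    · exact Prod.ext (by ring) (by ring)

-- any duplicate-free list of in-bounds cells has at most n*n elements
lemma pvNodupBoundedLen (n : Int) (v : List (Int × Int)) (hnd : v.Nodup)
    (hb : ∀ p ∈ v, pvInBounds n p.1 p.2 = true) : v.length ≤ n.toNat * n.toNat := by
  have hinj : ∀ p ∈ v, ∀ q ∈ v, (p.1.toNat, p.2.toNat) = (q.1.toNat, q.2.toNat) → p = q := by
    intro p hp q hq h
    have h1 := hb p hp; have h2 := hb q hq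
    simp [pvInBounds] at h1 h2
    simp only [Prod.mk.injEq] at h
    exact Prod.ext (by omega) (by omega)
  have hm : (v.map (fun p => (p.1.toNat, p.2.toNat))).Nodup := hnd.map_on hinj
  calc v.length = (v.map (fun p => (p.1.toNat, p.2.toNat))).length := (List.length_map _).symm
  _ = (v.map (fun p => (p.1.toNat, p.2.toNat))).toFinset.card := (List.toFinset_card_of_nodup hm).symm
  _ ≤ (Finset.range n.toNat ×ˢ Finset.range n.toNat).card := by
      apply Finset.card_le_card
      intro x hx
      simp only [List.mem_toFinset, List.mem_map] at hx
      obtain ⟨p, hp, rfl⟩ := hx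
      have := hb p hp
      simp [pvInBounds] at this
      simp [Finset.mem_product]
      omega
  _ = n.toNat * n.toNat := by simp [Finset.card_product]

lemma pvNodupSubsetLen {α : Type} [DecidableEq α] (v w : List α) (hnd : v.Nodup)
    (hsub : ∀ p ∈ v, p ∈ w) : v.length ≤ w.length := by
  calc v.length = v.toFinset.card := (List.toFinset_card_of_nodup hnd).symm
  _ ≤ w.toFinset.card := Finset.card_le_card (by
      intro x hx; simp only [List.mem_toFinset] at *; exact hsub x hx)
  _ ≤ w.length := w.toFinset_card_le

-- ---- the two inner-loop frontier folds ----

lemma pvFoldA (board : List (List (Option String))) (color : String) (L : List (Int × Int)) :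
    ∀ (v w : List (Int × Int)), v.Nodup →
    ∃ fresh : List (Int × Int),
      (L.foldl (fun (st : PySem.Set (Int × Int) × List (Int × Int)) p =>
          if p ∉ st.1 ∧ pvAGet board p.1 p.2 = some color then
            (PySem.Set.add st.1 p, st.2 ++ [p])
          else st) (v, w)) = (v ++ fresh, w ++ fresh)
      ∧ (v ++ fresh).Nodup
      ∧ (∀ p ∈ fresh, p ∈ L ∧ p ∉ v ∧ pvAGet board p.1 p.2 = some color)
      ∧ (∀ p ∈ L, pvAGet board p.1 p.2 = some color → p ∈ v ++ fresh) := by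
  induction L with
  | nil =>
    intro v w hv
    exact ⟨[], by simp, by simpa using hv, by simp, by simp⟩
  | cons p L ih =>
    intro v w hv
    simp only [List.foldl_cons]
    by_cases hc : p ∉ v ∧ pvAGet board p.1 p.2 = some color
    · rw [if_pos hc]
      have hadd : PySem.Set.add v p = v ++ [p] := PySem.Set.add_of_not_mem hc.1
      rw [hadd]
      have hv' : (v ++ [p]).Nodup := by
        rw [List.nodup_append]
        refine ⟨hv, List.nodup_singleton _, ?_⟩
        intro a ha b hb heq
        rw [List.eq_of_mem_singleton hb] at heq
        exact hc.1 (heq ▸ ha)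
      obtain ⟨fresh, heq, hnd, hfr, hcomp⟩ := ih (v ++ [p]) (w ++ [p]) hv'
      refine ⟨p :: fresh, ?_, ?_, ?_, ?_⟩
      · rw [heq]; simp
      · simpa [List.append_assoc] using hnd
      · intro q hq
        rcases List.mem_cons.mp hq with rfl | hq'
        · exact ⟨by simp, hc.1, hc.2⟩
        · obtain ⟨h1, h2, h3⟩ := hfr q hq'
          exact ⟨by simp [h1], fun hqv => h2 (by simp [hqv]), h3⟩
      · intro q hq hg
        rcases List.mem_cons.mp hq with rfl | hq'
        · simp
        · have := hcomp q hq' hg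
          simpa [List.append_assoc] using this
    · rw [if_neg hc]
      obtain ⟨fresh, heq, hnd, hfr, hcomp⟩ := ih v w hv
      refine ⟨fresh, heq, hnd, ?_, ?_⟩
      · intro q hq
        obtain ⟨h1, h2, h3⟩ := hfr q hq
        exact ⟨by simp [h1], h2, h3⟩
      · intro q hq hg
        rcases List.mem_cons.mp hq with rfl | hq'
        · have : q ∈ v := by
            by_contra hqv
            exact hc ⟨hqv, hg⟩
          simp [this]
        · exact hcomp q hq' hg

lemma pvFoldB (d : PySem.Dict (Int × Int) String) (color : String) (x y : Int)
    (L : List (Int × Int)) :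
    ∀ (v w : List (Int × Int)), v.Nodup →
    ∃ fresh : List (Int × Int),
      (L.foldl (fun (st : PySem.Set (Int × Int) × List (Int × Int)) dd =>
          if (x + dd.1, y + dd.2) ∉ st.1 ∧ d.get? (x + dd.1, y + dd.2) = some color then
            (PySem.Set.add st.1 (x + dd.1, y + dd.2), st.2 ++ [(x + dd.1, y + dd.2)])
          else st) (v, w)) = (v ++ fresh, w ++ fresh)
      ∧ (v ++ fresh).Nodup
      ∧ (∀ p ∈ fresh, (∃ dd ∈ L, p = (x + dd.1, y + dd.2)) ∧ p ∉ v ∧ d.get? p = some color)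
      ∧ (∀ dd ∈ L, d.get? (x + dd.1, y + dd.2) = some color →
           (x + dd.1, y + dd.2) ∈ v ++ fresh) := by
  induction L with
  | nil =>
    intro v w hv
    exact ⟨[], by simp, by simpa using hv, by simp, by simp⟩
  | cons dd L ih =>
    intro v w hv
    simp only [List.foldl_cons]
    by_cases hc : (x + dd.1, y + dd.2) ∉ v ∧ d.get? (x + dd.1, y + dd.2) = some color
    · rw [if_pos hc]
      have hadd : PySem.Set.add v (x + dd.1, y + dd.2) = v ++ [(x + dd.1, y + dd.2)] :=
        PySem.Set.add_of_not_mem hc.1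
      rw [hadd]
      have hv' : (v ++ [(x + dd.1, y + dd.2)]).Nodup := by
        rw [List.nodup_append]
        refine ⟨hv, List.nodup_singleton _, ?_⟩
        intro a ha b hb heq
        rw [List.eq_of_mem_singleton hb] at heq
        exact hc.1 (heq ▸ ha)
      obtain ⟨fresh, heq, hnd, hfr, hcomp⟩ := ih (v ++ [(x + dd.1, y + dd.2)]) (w ++ [(x + dd.1, y + dd.2)]) hv'
      refine ⟨(x + dd.1, y + dd.2) :: fresh, ?_, ?_, ?_, ?_⟩
      · rw [heq]; simp
      · simpa [List.append_assoc] using hnd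
      · intro q hq
        rcases List.mem_cons.mp hq with rfl | hq'
        · exact ⟨⟨dd, by simp⟩, hc.1, hc.2⟩
        · obtain ⟨h1, h2, h3⟩ := hfr q hq'
          obtain ⟨ee, he1, he2⟩ := h1
          exact ⟨⟨ee, by simp [he1], he2⟩, fun hqv => h2 (by simp [hqv]), h3⟩
      · intro ee hee hg
        rcases List.mem_cons.mp hee with rfl | hee'
        · simp
        · have := hcomp ee hee' hg
          simpa [List.append_assoc] using this
    · rw [if_neg hc]
      obtain ⟨fresh, heq, hnd, hfr, hcomp⟩ := ih v w hv
      refine ⟨fresh, heq, hnd, ?_, ?_⟩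
      · intro q hq
        obtain ⟨h1, h2, h3⟩ := hfr q hq
        obtain ⟨ee, he1, he2⟩ := h1
        exact ⟨⟨ee, by simp [he1], he2⟩, h2, h3⟩
      · intro ee hee hg
        rcases List.mem_cons.mp hee with rfl | hee'
        · have : (x + ee.1, y + ee.2) ∈ v := by
            by_contra hqv
            exact hc ⟨hqv, hg⟩
          simp [this]
        · exact hcomp ee hee' hg

-- ---- correctness of A's BFS worklist loop ----

lemma pvBfsLoop_spec (n : Int) (board : List (List (Option String))) (color : String)
    (useRow : Bool) (S : Int × Int → Prop) :
    ∀ (fuel : Nat) (visited : PySem.Set (Int × Int)) (q : List (Int × Int)),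
    visited.Nodup →
    (∀ p ∈ q, p ∈ visited) →
    (∀ p ∈ visited, pvGoodA n board color p) →
    (∀ p ∈ visited, pvReach (pvGoodA n board color) S p) →
    (∀ p, S p → p ∈ visited) →
    (∀ p ∈ visited, p ∉ q →
      (∀ q', pvAdj p q' → pvGoodA n board color q' → q' ∈ visited) ∧ ¬ (pvSel useRow p = n - 1)) →
    q.length + n.toNat * n.toNat ≤ fuel + visited.length →
    (pvBfsLoop n board color useRow fuel visited q = true ↔
      ∃ x, pvReach (pvGoodA n board color) S x ∧ pvSel useRow x = n - 1) := by
  intro fuel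
  induction fuel with
  | zero =>
    intro visited q hnd hqv hgood hreach hSv hclosed hfuel
    have hvlen : visited.length ≤ n.toNat * n.toNat :=
      pvNodupBoundedLen n visited hnd (fun p hp => (hgood p hp).1)
    have hq : q = [] := List.length_eq_zero_iff.mp (by omega)
    subst hq
    simp only [pvBfsLoop, Bool.false_eq_true, false_iff]
    rintro ⟨x, hx, htar⟩
    have hxv : x ∈ visited := pvReach_subset_closed hSv
      (fun p hp q' hadj hg => (hclosed p hp (by simp)).1 q' hadj hg) x hx
    exact (hclosed x hxv (by simp)).2 htar
  | succ fuel ih =>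
    intro visited q hnd hqv hgood hreach hSv hclosed hfuel
    rcases q with _ | ⟨⟨r, c⟩, rest⟩
    · simp only [pvBfsLoop, Bool.false_eq_true, false_iff]
      rintro ⟨x, hx, htar⟩
      have hxv : x ∈ visited := pvReach_subset_closed hSv
        (fun p hp q' hadj hg => (hclosed p hp (by simp)).1 q' hadj hg) x hx
      exact (hclosed x hxv (by simp)).2 htar
    · rw [pvBfsLoop]
      by_cases htar : (if useRow then r else c) = n - 1
      · rw [if_pos htar]
        simp only [true_iff]
        exact ⟨(r, c), hreach _ (hqv _ (by simp)), by simpa [pvSel] using htar⟩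
      · rw [if_neg htar]
        obtain ⟨fresh, heq, hnd', hfr, hcomp⟩ :=
          pvFoldA board color (pvNeighbors n r c) visited rest hnd
        simp only [heq]
        apply ih (visited ++ fresh) (rest ++ fresh) hnd'
        · intro p hp
          rcases List.mem_append.mp hp with hp | hp
          · exact List.mem_append.mpr (Or.inl (hqv p (by simp [hp])))
          · exact List.mem_append.mpr (Or.inr hp)
        · intro p hp
          rcases List.mem_append.mp hp with hp | hp
          · exact hgood p hp
          · obtain ⟨h1, _, h3⟩ := hfr p hp
            exact ⟨(mem_pvNeighbors.mp h1).2, h3⟩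
        · intro p hp
          rcases List.mem_append.mp hp with hp | hp
          · exact hreach p hp
          · obtain ⟨h1, _, h3⟩ := hfr p hp
            obtain ⟨hadj, hbnd⟩ := mem_pvNeighbors.mp h1
            exact pvReach.step (hreach _ (hqv _ (by simp))) hadj ⟨hbnd, h3⟩
        · intro p hp
          exact List.mem_append.mpr (Or.inl (hSv p hp))
        · intro p hp hnotin
          rcases List.mem_append.mp hp with hpv | hpf
          · by_cases hpq : p ∈ (r, c) :: rest
            · have hpr : p = (r, c) := by
                rcases List.mem_cons.mp hpq with h | h
                · exact h
                · exact absurd (List.mem_append.mpr (Or.inl h)) hnotin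
              subst hpr
              refine ⟨?_, by simpa [pvSel] using htar⟩
              intro q' hadj hg
              exact hcomp q' (mem_pvNeighbors.mpr ⟨hadj, hg.1⟩) hg.2
            · obtain ⟨hcl, hnt⟩ := hclosed p hpv hpq
              exact ⟨fun q' hadj hg => List.mem_append.mpr (Or.inl (hcl q' hadj hg)), hnt⟩
          · exact absurd (List.mem_append.mpr (Or.inr hpf)) hnotin
        · simp only [List.length_append, List.length_cons] at hfuel ⊢
          omega

-- ---- correctness of B's DFS worklist loop ----

lemma pvDfsLoop_spec (n : Int) (d : PySem.Dict (Int × Int) String) (color : String)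
    (S : Int × Int → Prop) (N : Nat)
    (hcard : ∀ v : List (Int × Int), v.Nodup → (∀ p ∈ v, pvGoodD d color p) → v.length ≤ N)
    (useRow : Bool) (hrow : useRow = decide (color = "B")) :
    ∀ (fuel : Nat) (comp : PySem.Set (Int × Int)) (stack : List (Int × Int)) (lo hi : Bool),
    comp.Nodup → stack.Nodup →
    (∀ p ∈ stack, p ∈ comp) →
    (∀ p ∈ comp, pvGoodD d color p) →
    (∀ p ∈ comp, pvReach (pvGoodD d color) S p) →
    (∀ p, S p → p ∈ comp) →
    (∀ p ∈ comp, p ∉ stack → ∀ q', pvAdj p q' → pvGoodD d color q' → q' ∈ comp) →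
    (lo = true ↔ ∃ p ∈ comp, p ∉ stack ∧ pvSel useRow p = 0) →
    (hi = true ↔ ∃ p ∈ comp, p ∉ stack ∧ pvSel useRow p = n - 1) →
    stack.length + N ≤ fuel + comp.length →
    (((pvDfsLoop n d color fuel comp stack lo hi).1 = true ↔
        ∃ x, pvReach (pvGoodD d color) S x ∧ pvSel useRow x = 0) ∧
     ((pvDfsLoop n d color fuel comp stack lo hi).2 = true ↔
        ∃ x, pvReach (pvGoodD d color) S x ∧ pvSel useRow x = n - 1)) := by
  intro fuel
  induction fuel with
  | zero =>
    intro comp stack lo hi hndc hnds hsc hgood hreach hSv hclosed hlo hhi hfuel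
    have hclen : comp.length ≤ N := hcard comp hndc hgood
    have hst : stack = [] := List.length_eq_zero_iff.mp (by omega)
    subst hst
    have hcompiff : ∀ t : Int, (lo = true ↔ ∃ p ∈ comp, p ∉ ([] : List (Int × Int)) ∧ pvSel useRow p = t) →
        (lo = true ↔ ∃ x, pvReach (pvGoodD d color) S x ∧ pvSel useRow x = t) := by
      intro t h
      rw [h]
      constructor
      · rintro ⟨p, hp, _, hsel⟩
        exact ⟨p, hreach p hp, hsel⟩
      · rintro ⟨x, hx, hsel⟩
        exact ⟨x, pvReach_subset_closed hSv
          (fun p hp q' hadj hg => hclosed p hp (by simp) q' hadj hg) x hx, by simp, hsel⟩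
    exact ⟨hcompiff 0 hlo, by
      rw [show (pvDfsLoop n d color 0 comp [] lo hi).2 = hi from rfl]
      rw [hhi]
      constructor
      · rintro ⟨p, hp, _, hsel⟩
        exact ⟨p, hreach p hp, hsel⟩
      · rintro ⟨x, hx, hsel⟩
        exact ⟨x, pvReach_subset_closed hSv
          (fun p hp q' hadj hg => hclosed p hp (by simp) q' hadj hg) x hx, by simp, hsel⟩⟩
  | succ fuel ih =>
    intro comp stack lo hi hndc hnds hsc hgood hreach hSv hclosed hlo hhi hfuel
    rcases List.eq_nil_or_concat stack with rfl | ⟨ss, ⟨x, y⟩, rfl⟩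
    · constructor
      · rw [show (pvDfsLoop n d color (fuel + 1) comp [] lo hi).1 = lo from rfl, hlo]
        constructor
        · rintro ⟨p, hp, _, hsel⟩
          exact ⟨p, hreach p hp, hsel⟩
        · rintro ⟨x, hx, hsel⟩
          exact ⟨x, pvReach_subset_closed hSv
            (fun p hp q' hadj hg => hclosed p hp (by simp) q' hadj hg) x hx, by simp, hsel⟩
      · rw [show (pvDfsLoop n d color (fuel + 1) comp [] lo hi).2 = hi from rfl, hhi]
        constructor
        · rintro ⟨p, hp, _, hsel⟩
          exact ⟨p, hreach p hp, hsel⟩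
        · rintro ⟨x, hx, hsel⟩
          exact ⟨x, pvReach_subset_closed hSv
            (fun p hp q' hadj hg => hclosed p hp (by simp) q' hadj hg) x hx, by simp, hsel⟩
    · simp only [List.concat_eq_append] at hnds hsc hclosed hlo hhi hfuel ⊢
      have hxy_comp : (x, y) ∈ comp := hsc _ (by simp)
      have hxy_ss : (x, y) ∉ ss := by
        have := List.nodup_append.mp hnds
        intro hmem
        exact this.2.2 _ hmem _ (by simp) rfl
      have hsel_eq : (if color = "B" then x else y) = pvSel useRow (x, y) := by
        by_cases hcB : color = "B" <;> simp [pvSel, hrow, hcB]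
      rw [pvDfsLoop]
      simp only [List.getLast?_concat, List.dropLast_concat]
      obtain ⟨fresh, heq, hnd', hfr, hcomp'⟩ := pvFoldB d color x y pvDeltas comp ss hndc
      simp only [heq]
      have hfresh_not_comp : ∀ p ∈ fresh, p ∉ comp := fun p hp => (hfr p hp).2.1
      have hfr_good : ∀ p ∈ fresh, pvGoodD d color p := fun p hp => (hfr p hp).2.2
      have hfr_adj : ∀ p ∈ fresh, pvAdj (x, y) p := by
        intro p hp
        obtain ⟨⟨dd, hdd, rfl⟩, _, _⟩ := hfr p hp
        unfold pvAdj
        simpa using hdd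
      have hpopped : ∀ p, (p ∈ comp ++ fresh ∧ p ∉ ss ++ fresh) ↔
          ((p ∈ comp ∧ p ∉ ss ++ [(x, y)]) ∨ p = (x, y)) := by
        intro p
        constructor
        · rintro ⟨hp, hnp⟩
          rcases List.mem_append.mp hp with hp | hp
          · by_cases hpe : p = (x, y)
            · exact Or.inr hpe
            · refine Or.inl ⟨hp, ?_⟩
              intro hmem
              rcases List.mem_append.mp hmem with h | h
              · exact hnp (List.mem_append.mpr (Or.inl h))
              · exact hpe (by simpa using h)
          · exact absurd (List.mem_append.mpr (Or.inr hp)) hnp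
        · rintro (⟨hp, hnp⟩ | rfl)
          · exact ⟨List.mem_append.mpr (Or.inl hp), fun hmem => by
              rcases List.mem_append.mp hmem with h | h
              · exact hnp (List.mem_append.mpr (Or.inl h))
              · exact hfresh_not_comp p h hp⟩
          · exact ⟨List.mem_append.mpr (Or.inl hxy_comp), fun hmem => by
              rcases List.mem_append.mp hmem with h | h
              · exact hxy_ss h
              · exact hfresh_not_comp _ h hxy_comp⟩
      apply ih (comp ++ fresh) (ss ++ fresh) _ _ hnd'
      · rw [List.nodup_append]
        have h0 := List.nodup_append.mp hnds
        have h1 := List.nodup_append.mp hnd'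
        refine ⟨h0.1, h1.2.1, ?_⟩
        intro a ha b hb heq2
        subst heq2
        exact hfresh_not_comp a hb (hsc a (List.mem_append.mpr (Or.inl ha)))
      · intro p hp
        rcases List.mem_append.mp hp with hp | hp
        · exact List.mem_append.mpr (Or.inl (hsc p (List.mem_append.mpr (Or.inl hp))))
        · exact List.mem_append.mpr (Or.inr hp)
      · intro p hp
        rcases List.mem_append.mp hp with hp | hp
        · exact hgood p hp
        · exact hfr_good p hp
      · intro p hp
        rcases List.mem_append.mp hp with hp | hp
        · exact hreach p hp
        · exact pvReach.step (hreach _ hxy_comp) (hfr_adj p hp) (hfr_good p hp)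
      · intro p hp
        exact List.mem_append.mpr (Or.inl (hSv p hp))
      · intro p hp hnotin q' hadj hg
        rcases (hpopped p).mp ⟨hp, hnotin⟩ with ⟨hpc, hpns⟩ | rfl
        · exact List.mem_append.mpr (Or.inl (hclosed p hpc hpns q' hadj hg))
        · have : q' = (x + (q'.1 - x), y + (q'.2 - y)) := by
            exact Prod.ext (by ring) (by ring)
          rw [this]
          exact hcomp' (q'.1 - x, q'.2 - y) hadj (by rw [← this]; exact hg)
      · rw [Bool.or_eq_true, hlo, decide_eq_true_eq, hsel_eq]
        constructor
        · rintro (⟨p, hp, hnp, hs⟩ | hs)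
          · obtain ⟨h1, h2⟩ := (hpopped p).mpr (Or.inl ⟨hp, hnp⟩)
            exact ⟨p, h1, h2, hs⟩
          · obtain ⟨h1, h2⟩ := (hpopped (x, y)).mpr (Or.inr rfl)
            exact ⟨(x, y), h1, h2, hs⟩
        · rintro ⟨p, hp, hnp, hs⟩
          rcases (hpopped p).mp ⟨hp, hnp⟩ with ⟨h1, h2⟩ | rfl
          · exact Or.inl ⟨p, h1, h2, hs⟩
          · exact Or.inr hs
      · rw [Bool.or_eq_true, hhi, decide_eq_true_eq, hsel_eq]
        constructor
        · rintro (⟨p, hp, hnp, hs⟩ | hs)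
          · obtain ⟨h1, h2⟩ := (hpopped p).mpr (Or.inl ⟨hp, hnp⟩)
            exact ⟨p, h1, h2, hs⟩
          · obtain ⟨h1, h2⟩ := (hpopped (x, y)).mpr (Or.inr rfl)
            exact ⟨(x, y), h1, h2, hs⟩
        · rintro ⟨p, hp, hnp, hs⟩
          rcases (hpopped p).mp ⟨hp, hnp⟩ with ⟨h1, h2⟩ | rfl
          · exact Or.inl ⟨p, h1, h2, hs⟩
          · exact Or.inr hs
      · simp only [List.length_append, List.length_cons] at hfuel ⊢
        omega

-- ---- the board/dict correspondence ----

lemma pvAGet_pvASet (n : Int) (board : List (List (Option String))) (r c : Int)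
    (v : Option String) (hwf : pvWF n board) (hrc : pvInBounds n r c = true)
    (r' c' : Int) (h' : pvInBounds n r' c' = true) :
    pvAGet (pvASet board r c v) r' c' = if (r', c') = (r, c) then v else pvAGet board r' c' := by
  obtain ⟨hlen, hrows⟩ := hwf
  simp only [pvInBounds, decide_eq_true_eq] at hrc h'
  have hr'lt : r'.toNat < board.length := by omega
  have hrlt : r.toNat < board.length := by omega
  unfold pvAGet pvASet
  rw [PySem.List.pyGet?_of_nonneg _ h'.1, PySem.List.pyGet?_of_nonneg _ h'.1,
    List.getElem?_modify, List.getElem?_eq_getElem hr'lt]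
  have hrowlen : (board[r'.toNat]).length = n.toNat := hrows _ (List.getElem_mem hr'lt)
  simp only [Option.map_eq_map, Option.map_some, Option.bind_some]
  by_cases hr : r.toNat = r'.toNat
  · rw [if_pos hr]
    have hrr : r' = r := by omega
    rw [PySem.List.pyGet?_of_nonneg _ h'.2.2.1, PySem.List.pyGet?_of_nonneg _ h'.2.2.1,
      List.getElem?_set]
    by_cases hcc : c.toNat = c'.toNat
    · have hc' : c' = c := by omega
      rw [if_pos hcc, if_pos (by omega), if_pos (by rw [hrr, hc'])]
      simp
    · have hc' : c' ≠ c := by omega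
      rw [if_neg hcc, if_neg (by intro h; rw [Prod.mk.injEq] at h; omega)]
  · rw [if_neg hr]
    have hrr : r' ≠ r := by omega
    rw [if_neg (by intro h; rw [Prod.mk.injEq] at h; omega)]

lemma pvWF_pvASet (n : Int) (board : List (List (Option String))) (r c : Int)
    (v : Option String) (hwf : pvWF n board) : pvWF n (pvASet board r c v) := by
  obtain ⟨hlen, hrows⟩ := hwf
  constructor
  · rw [pvASet, List.length_modify]; exact hlen
  · intro row hrow
    rw [pvASet] at hrow
    obtain ⟨j, hj, rfl⟩ := List.mem_iff_getElem.mp hrow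
    rw [List.getElem_modify]
    split_ifs
    · rw [List.length_set]
      exact hrows _ (List.getElem_mem _)
    · exact hrows _ (List.getElem_mem _)

lemma pvWF_init (n : Int) : pvWF n (List.replicate n.toNat (List.replicate n.toNat none)) := by
  constructor
  · simp
  · intro row hrow
    rw [List.eq_of_mem_replicate hrow]
    simp

lemma pvAGet_init (n : Int) (r c : Int) :
    pvAGet (List.replicate n.toNat (List.replicate n.toNat (none : Option String))) r c = none := by
  unfold pvAGet
  cases h1 : PySem.List.pyGet? (List.replicate n.toNat (List.replicate n.toNat (none : Option String))) r with
  | none => simp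
  | some row =>
    have hrow : row = List.replicate n.toNat none :=
      List.eq_of_mem_replicate (PySem.List.mem_of_pyGet?_eq_some _ h1)
    subst hrow
    cases h2 : PySem.List.pyGet? (List.replicate n.toNat (none : Option String)) c with
    | none => simp [h2]
    | some cell =>
      have : cell = none := List.eq_of_mem_replicate (PySem.List.mem_of_pyGet?_eq_some _ h2)
      subst this
      simp [h2]

-- ---- characterisation of has_connection and of B's per-move check ----

lemma pvInitRow (board : List (List (Option String))) (L : List Int) :
    ∀ v : List (Int × Int), v.Nodup → L.Nodup → (∀ cc ∈ L, (0, cc) ∉ v) →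
    ∃ F : List (Int × Int),
      (L.foldl (fun (st : PySem.Set (Int × Int) × List (Int × Int)) c =>
          if pvAGet board 0 c = some "B" then (PySem.Set.add st.1 (0, c), st.2 ++ [(0, c)]) else st)
        (v, v)) = (v ++ F, v ++ F)
      ∧ (v ++ F).Nodup
      ∧ (∀ p, p ∈ F ↔ p ∉ v ∧ ∃ cc ∈ L, p = (0, cc) ∧ pvAGet board 0 cc = some "B") := by
  induction L with
  | nil =>
    intro v hv _ _
    exact ⟨[], by simp, by simpa using hv, by simp⟩
  | cons c L ih =>
    intro v hv hL hfresh
    simp only [List.foldl_cons]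
    by_cases hc : pvAGet board 0 c = some "B"
    · rw [if_pos hc]
      have hnotm : (0, c) ∉ v := hfresh c (by simp)
      have hadd : PySem.Set.add v (0, c) = v ++ [(0, c)] := PySem.Set.add_of_not_mem hnotm
      rw [hadd]
      have hv' : (v ++ [(0, c)]).Nodup := by
        rw [List.nodup_append]
        refine ⟨hv, List.nodup_singleton _, ?_⟩
        intro a ha b hb heq
        rw [List.eq_of_mem_singleton hb] at heq
        exact hnotm (heq ▸ ha)
      obtain ⟨F, heq, hnd, hmem⟩ := ih (v ++ [(0, c)]) hv' hL.of_cons (by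
        intro cc hcc
        simp only [List.mem_append, List.mem_singleton, Prod.mk.injEq, not_or]
        refine ⟨hfresh cc (by simp [hcc]), ?_⟩
        rintro ⟨-, rfl⟩
        exact (List.nodup_cons.mp hL).1 hcc)
      refine ⟨(0, c) :: F, by rw [heq]; simp, by simpa [List.append_assoc] using hnd, ?_⟩
      intro p
      constructor
      · intro hp
        rcases List.mem_cons.mp hp with rfl | hp'
        · exact ⟨hnotm, c, by simp, rfl, hc⟩
        · obtain ⟨h1, cc, h2, h3, h4⟩ := (hmem p).mp hp'
          exact ⟨fun hpv => h1 (by simp [hpv]), cc, by simp [h2], h3, h4⟩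
      · rintro ⟨h1, cc, h2, rfl, h4⟩
        rcases List.mem_cons.mp h2 with rfl | h2'
        · simp
        · refine List.mem_cons.mpr (Or.inr ((hmem _).mpr ⟨?_, cc, h2', rfl, h4⟩))
          simp only [List.mem_append, List.mem_singleton, Prod.mk.injEq, not_or]
          refine ⟨h1, ?_⟩
          rintro ⟨-, rfl⟩
          exact (List.nodup_cons.mp hL).1 h2'
    · rw [if_neg hc]
      obtain ⟨F, heq, hnd, hmem⟩ := ih v hv hL.of_cons (fun cc hcc => hfresh cc (by simp [hcc]))
      refine ⟨F, heq, hnd, ?_⟩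
      intro p
      rw [hmem p]
      constructor
      · rintro ⟨h1, cc, h2, h3, h4⟩
        exact ⟨h1, cc, by simp [h2], h3, h4⟩
      · rintro ⟨h1, cc, h2, rfl, h4⟩
        rcases List.mem_cons.mp h2 with rfl | h2'
        · exact absurd h4 hc
        · exact ⟨h1, cc, h2', rfl, h4⟩

lemma pvInitCol (board : List (List (Option String))) (L : List Int) :
    ∀ v : List (Int × Int), v.Nodup → L.Nodup → (∀ rr ∈ L, (rr, 0) ∉ v) →
    ∃ F : List (Int × Int),
      (L.foldl (fun (st : PySem.Set (Int × Int) × List (Int × Int)) r =>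
          if pvAGet board r 0 = some "W" then (PySem.Set.add st.1 (r, 0), st.2 ++ [(r, 0)]) else st)
        (v, v)) = (v ++ F, v ++ F)
      ∧ (v ++ F).Nodup
      ∧ (∀ p, p ∈ F ↔ p ∉ v ∧ ∃ rr ∈ L, p = (rr, 0) ∧ pvAGet board rr 0 = some "W") := by
  induction L with
  | nil =>
    intro v hv _ _
    exact ⟨[], by simp, by simpa using hv, by simp⟩
  | cons c L ih =>
    intro v hv hL hfresh
    simp only [List.foldl_cons]
    by_cases hc : pvAGet board c 0 = some "W"
    · rw [if_pos hc]
      have hnotm : (c, 0) ∉ v := hfresh c (by simp)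
      have hadd : PySem.Set.add v (c, 0) = v ++ [(c, 0)] := PySem.Set.add_of_not_mem hnotm
      rw [hadd]
      have hv' : (v ++ [(c, 0)]).Nodup := by
        rw [List.nodup_append]
        refine ⟨hv, List.nodup_singleton _, ?_⟩
        intro a ha b hb heq
        rw [List.eq_of_mem_singleton hb] at heq
        exact hnotm (heq ▸ ha)
      obtain ⟨F, heq, hnd, hmem⟩ := ih (v ++ [(c, 0)]) hv' hL.of_cons (by
        intro cc hcc
        simp only [List.mem_append, List.mem_singleton, Prod.mk.injEq, not_or]
        refine ⟨hfresh cc (by simp [hcc]), ?_⟩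
        rintro ⟨rfl, -⟩
        exact (List.nodup_cons.mp hL).1 hcc)
      refine ⟨(c, 0) :: F, by rw [heq]; simp, by simpa [List.append_assoc] using hnd, ?_⟩
      intro p
      constructor
      · intro hp
        rcases List.mem_cons.mp hp with rfl | hp'
        · exact ⟨hnotm, c, by simp, rfl, hc⟩
        · obtain ⟨h1, cc, h2, h3, h4⟩ := (hmem p).mp hp'
          exact ⟨fun hpv => h1 (by simp [hpv]), cc, by simp [h2], h3, h4⟩
      · rintro ⟨h1, cc, h2, rfl, h4⟩
        rcases List.mem_cons.mp h2 with rfl | h2'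
        · simp
        · refine List.mem_cons.mpr (Or.inr ((hmem _).mpr ⟨?_, cc, h2', rfl, h4⟩))
          simp only [List.mem_append, List.mem_singleton, Prod.mk.injEq, not_or]
          refine ⟨h1, ?_⟩
          rintro ⟨rfl, -⟩
          exact (List.nodup_cons.mp hL).1 h2'
    · rw [if_neg hc]
      obtain ⟨F, heq, hnd, hmem⟩ := ih v hv hL.of_cons (fun cc hcc => hfresh cc (by simp [hcc]))
      refine ⟨F, heq, hnd, ?_⟩
      intro p
      rw [hmem p]
      constructor
      · rintro ⟨h1, cc, h2, h3, h4⟩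
        exact ⟨h1, cc, by simp [h2], h3, h4⟩
      · rintro ⟨h1, cc, h2, rfl, h4⟩
        rcases List.mem_cons.mp h2 with rfl | h2'
        · exact absurd h4 hc
        · exact ⟨h1, cc, h2', rfl, h4⟩

lemma pvHasConnection_iff (n : Int) (board : List (List (Option String))) (color : String)
    (hc : color = "B" ∨ color = "W") :
    (pvHasConnection n board color = true ↔ pvConn n (color = "B") (pvGoodA n board color)) := by
  have hfuel : ∀ (F : List (Int × Int)),
      F.length + n.toNat * n.toNat ≤ pvFuelA n + F.length := by
    intro F
    unfold pvFuelA
    omega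
  rcases hc with rfl | rfl
  · rw [pvHasConnection, if_pos rfl]
    obtain ⟨F, heq, hnd, hmem⟩ := pvInitRow board (PySem.List.pyRange 0 n 1) []
      List.nodup_nil (PySem.List.nodup_pyRange_one _ _) (by simp)
    have hmemF : ∀ p, p ∈ F ↔ (pvSel true p = 0 ∧ pvGoodA n board "B" p) := by
      intro p
      rw [hmem p]
      constructor
      · rintro ⟨-, cc, hcc, rfl, hlook⟩
        rw [PySem.List.mem_pyRange_one] at hcc
        exact ⟨by simp [pvSel], by simp [pvInBounds]; omega, hlook⟩
      · rintro ⟨hsel, hin, hlook⟩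
        simp only [pvSel, if_true] at hsel
        refine ⟨by simp, p.2, ?_, ?_, ?_⟩
        · rw [PySem.List.mem_pyRange_one]
          simp [pvInBounds] at hin
          omega
        · exact Prod.ext (by simpa using hsel) rfl
        · rw [show (0 : Int) = p.1 from hsel.symm]
          exact hlook
    have hES : PySem.Set.empty = ([] : List (Int × Int)) := rfl
    rw [show (decide (("B" : String) = "B")) = true from by decide]
    simp only [hES, heq, List.nil_append]
    rw [pvBfsLoop_spec n board "B" true (fun p => pvSel true p = 0 ∧ pvGoodA n board "B" p)
      (pvFuelA n) F F hnd (fun p hp => hp) (fun p hp => ((hmemF p).mp hp).2)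
      (fun p hp => pvReach.base p ((hmemF p).mp hp))
      (fun p hp => (hmemF p).mpr hp)
      (fun p hp hnp => absurd hp hnp) (hfuel F)]
    unfold pvConn
    constructor
    · rintro ⟨x, hx, hsel⟩
      rw [pvReach_iff (fun p hp => hp.2)] at hx
      obtain ⟨sp, ⟨hs0, -⟩, hP⟩ := hx
      exact ⟨sp, x, hs0, hsel, hP⟩
    · rintro ⟨sp, x, hs0, hsel, hP⟩
      refine ⟨x, ?_, hsel⟩
      rw [pvReach_iff (fun p hp => hp.2)]
      exact ⟨sp, ⟨hs0, pvP_good_left hP⟩, hP⟩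
  · rw [pvHasConnection, if_neg (by decide)]
    obtain ⟨F, heq, hnd, hmem⟩ := pvInitCol board (PySem.List.pyRange 0 n 1) []
      List.nodup_nil (PySem.List.nodup_pyRange_one _ _) (by simp)
    have hmemF : ∀ p, p ∈ F ↔ (pvSel false p = 0 ∧ pvGoodA n board "W" p) := by
      intro p
      rw [hmem p]
      constructor
      · rintro ⟨-, cc, hcc, rfl, hlook⟩
        rw [PySem.List.mem_pyRange_one] at hcc
        exact ⟨by simp [pvSel], by simp [pvInBounds]; omega, hlook⟩
      · rintro ⟨hsel, hin, hlook⟩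
        replace hsel : p.2 = 0 := by simpa [pvSel] using hsel
        refine ⟨by simp, p.1, ?_, ?_, ?_⟩
        · rw [PySem.List.mem_pyRange_one]
          simp [pvInBounds] at hin
          omega
        · exact Prod.ext rfl (by simpa using hsel)
        · rw [show (0 : Int) = p.2 from hsel.symm]
          exact hlook
    have hES : PySem.Set.empty = ([] : List (Int × Int)) := rfl
    rw [show (decide (("W" : String) = "B")) = false from by decide]
    simp only [hES, heq, List.nil_append]
    rw [pvBfsLoop_spec n board "W" false (fun p => pvSel false p = 0 ∧ pvGoodA n board "W" p)
      (pvFuelA n) F F hnd (fun p hp => hp) (fun p hp => ((hmemF p).mp hp).2)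
      (fun p hp => pvReach.base p ((hmemF p).mp hp))
      (fun p hp => (hmemF p).mpr hp)
      (fun p hp hnp => absurd hp hnp) (hfuel F)]
    unfold pvConn
    constructor
    · rintro ⟨x, hx, hsel⟩
      rw [pvReach_iff (fun p hp => hp.2)] at hx
      obtain ⟨sp, ⟨hs0, -⟩, hP⟩ := hx
      exact ⟨sp, x, hs0, hsel, hP⟩
    · rintro ⟨sp, x, hs0, hsel, hP⟩
      refine ⟨x, ?_, hsel⟩
      rw [pvReach_iff (fun p hp => hp.2)]
      exact ⟨sp, ⟨hs0, pvP_good_left hP⟩, hP⟩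

-- placing a fresh stone: the new position connects iff the new stone's component
-- touches both edges, provided no connection existed before
lemma pvConn_insert_iff (n : Int) (useRow : Bool) (d : PySem.Dict (Int × Int) String)
    (s0 : Int × Int) (c : String) (hfresh : d.get? s0 = none)
    (hprior : ¬ pvConn n useRow (pvGoodD d c)) :
    pvConn n useRow (pvGoodD (d.insert s0 c) c) ↔
      ((∃ x, pvP (pvGoodD (d.insert s0 c) c) s0 x ∧ pvSel useRow x = 0) ∧
       (∃ x, pvP (pvGoodD (d.insert s0 c) c) s0 x ∧ pvSel useRow x = n - 1)) := by
  have hmono : ∀ z, pvGoodD d c z → pvGoodD (d.insert s0 c) c z := by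
    intro z hz
    unfold pvGoodD at *
    have hne : z ≠ s0 := by
      rintro rfl
      rw [hfresh] at hz
      cases hz
    rw [PySem.Dict.get?_insert]
    rw [if_neg hne]
    exact hz
  have hgz : ∀ z, pvGoodD (d.insert s0 c) c z → z = s0 ∨ pvGoodD d c z := by
    intro z hz
    by_cases he : z = s0
    · exact Or.inl he
    · right
      unfold pvGoodD at *
      rwa [PySem.Dict.get?_insert, if_neg he] at hz
  have hsplit : ∀ a b, pvP (pvGoodD (d.insert s0 c) c) a b →
      pvP (pvGoodD d c) a b ∨
        (pvP (pvGoodD (d.insert s0 c) c) a s0 ∧ pvP (pvGoodD (d.insert s0 c) c) s0 b) := by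
    intro a b h
    induction h with
    | refl hp =>
      refine hgz _ hp |>.elim (fun heq2 => ?_) (fun hg => Or.inl (pvP.refl _ hg))
      subst heq2
      exact Or.inr ⟨pvP.refl _ hp, pvP.refl _ hp⟩
    | tail hab hadj hc2 ih =>
      rename_i b' c'
      rcases hgz c' hc2 with rfl | hg
      · rcases ih with hL | ⟨h1, h2⟩
        · exact Or.inr ⟨pvP.tail (pvP_mono hmono hL) hadj hc2, pvP.refl _ hc2⟩
        · exact Or.inr ⟨h1, pvP.refl _ hc2⟩
      · rcases ih with hL | ⟨h1, h2⟩
        · exact Or.inl (pvP.tail hL hadj hg)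
        · exact Or.inr ⟨h1, pvP.tail h2 hadj (hmono _ hg)⟩
  constructor
  · rintro ⟨sp, x, hs0, hx1, hp⟩
    rcases hsplit sp x hp with hL | ⟨h1, h2⟩
    · exact absurd ⟨sp, x, hs0, hx1, hL⟩ hprior
    · exact ⟨⟨sp, pvP_symm h1, hs0⟩, ⟨x, h2, hx1⟩⟩
  · rintro ⟨⟨xl, hl, hl0⟩, ⟨xh, hh, hh1⟩⟩
    exact ⟨xl, xh, hl0, hh1, pvP_trans (pvP_symm hl) hh⟩

-- ---- outer replay loops agree ----

lemma pvValid_true (n : Int) (mv : List (Int × Int)) (seen : PySem.Set (Int × Int))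
    (hnd : mv.Nodup) (hb : ∀ p ∈ mv, pvInBounds n p.1 p.2 = true)
    (hs : ∀ p ∈ mv, p ∉ seen) : pvValid n seen mv = true := by
  induction mv generalizing seen with
  | nil => rfl
  | cons p rest ih =>
    obtain ⟨r, c⟩ := p
    rw [pvValid]
    have hb0 := hb (r, c) (by simp)
    have hs0 := hs (r, c) (by simp)
    rw [if_neg (by push Not; exact ⟨by simp [hb0], hs0⟩)]
    refine ih _ hnd.of_cons (fun q hq => hb q (by simp [hq])) ?_
    intro q hq
    rw [PySem.Set.mem_add]
    push Not
    refine ⟨hs q (by simp [hq]), ?_⟩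
    rintro rfl
    exact (List.nodup_cons.mp hnd).1 hq

lemma pvBoolEq (a b : Bool) (h : (a = true) ↔ (b = true)) : a = b := by
  cases a <;> cases b <;> simp_all

lemma pvLoop_eq (n : Int) (M : Nat) :
    ∀ (mv : List (Int × Int)) (board : List (List (Option String)))
      (d : PySem.Dict (Int × Int) String) (i : Int),
    pvWF n board →
    (∀ rr cc : Int, pvInBounds n rr cc = true → pvAGet board rr cc = d.get? (rr, cc)) →
    (∀ (rr cc : Int) (v : String), d.get? (rr, cc) = some v → pvInBounds n rr cc = true) →
    mv.Nodup → (∀ p ∈ mv, pvInBounds n p.1 p.2 = true) →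
    (∀ p ∈ mv, d.get? p = none) →
    d.keys.Nodup →
    d.keys.length + mv.length ≤ M →
    ¬ pvConn n true (pvGoodD d "B") → ¬ pvConn n false (pvGoodD d "W") →
    pvLoopA n board i mv = pvLoopB n (M + 1) d i mv := by
  intro mv
  induction mv with
  | nil =>
    intro board d i _ _ _ _ _ _ _ _ _ _
    simp [pvLoopA, pvLoopB]
  | cons hd rest ih =>
    obtain ⟨r, c⟩ := hd
    intro board d i hwf hrel hkb hnd hbnds hfresh hknd hM hB hW
    have hbrc : pvInBounds n r c = true := hbnds (r, c) (by simp)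
    have hfrc : d.get? (r, c) = none := hfresh (r, c) (by simp)
    simp only [pvLoopA, pvLoopB]
    set cl := (if PySem.Int.mod i 2 = 1 then "B" else "W") with hcl
    have hcolor : cl = "B" ∨ cl = "W" := by
      rw [hcl]
      by_cases h : PySem.Int.mod i 2 = 1
      · rw [if_pos h]; exact Or.inl rfl
      · rw [if_neg h]; exact Or.inr rfl
    rw [if_neg (by
      push Not
      refine ⟨by simp [hbrc], ?_⟩
      rw [hrel r c hbrc]
      exact hfrc)]
    -- the updated board and dict still correspond
    have hwf' := pvWF_pvASet n board r c (some cl) hwf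
    have hrel' : ∀ rr cc : Int, pvInBounds n rr cc = true →
        pvAGet (pvASet board r c (some cl)) rr cc = (d.insert (r, c) cl).get? (rr, cc) := by
      intro rr cc hin
      rw [pvAGet_pvASet n board r c (some cl) hwf hbrc rr cc hin, PySem.Dict.get?_insert]
      by_cases he : (rr, cc) = (r, c)
      · rw [if_pos he, if_pos he]
      · rw [if_neg he, if_neg he]
        exact hrel rr cc hin
    have hkb' : ∀ (rr cc : Int) (v : String), (d.insert (r, c) cl).get? (rr, cc) = some v →
        pvInBounds n rr cc = true := by
      intro rr cc v h
      rw [PySem.Dict.get?_insert] at h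
      by_cases he : (rr, cc) = (r, c)
      · rw [Prod.mk.injEq] at he
        rw [he.1, he.2]
        exact hbrc
      · rw [if_neg he] at h
        exact hkb rr cc v h
    have hGoodIff : ∀ p : Int × Int,
        pvGoodA n (pvASet board r c (some cl)) cl p ↔ pvGoodD (d.insert (r, c) cl) cl p := by
      rintro ⟨pr, pc⟩
      constructor
      · rintro ⟨hin, hlook⟩
        show (d.insert (r, c) cl).get? (pr, pc) = some cl
        rw [← hrel' pr pc hin]
        exact hlook
      · intro hg
        have hg' : (d.insert (r, c) cl).get? (pr, pc) = some cl := hg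
        have hin : pvInBounds n pr pc = true := hkb' pr pc cl hg'
        exact ⟨hin, by rw [hrel' pr pc hin]; exact hg'⟩
    -- not already a key, so keys grow by exactly one
    have hncont : d.contains (r, c) = false := by
      rw [PySem.Dict.contains_eq_isSome_get?, hfrc]
      rfl
    have hkeys' : (d.insert (r, c) cl).keys = d.keys ++ [(r, c)] :=
      PySem.Dict.keys_insert_of_not_contains _ _ hncont
    have hknd' : (d.insert (r, c) cl).keys.Nodup := by
      rw [hkeys', List.nodup_append]
      refine ⟨hknd, List.nodup_singleton _, ?_⟩
      intro a ha b hb heq2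
      rw [List.eq_of_mem_singleton hb] at heq2
      have hca : d.contains a = true := (PySem.Dict.contains_iff_mem_keys _ _).mpr ha
      rw [heq2] at hca
      rw [hca] at hncont
      cases hncont
    -- the per-move DFS computes exactly the two edge flags of the new stone's component
    have hcard : ∀ v : List (Int × Int), v.Nodup →
        (∀ p ∈ v, pvGoodD (d.insert (r, c) cl) cl p) →
        v.length ≤ (d.insert (r, c) cl).keys.length := by
      intro v hv hg
      refine pvNodupSubsetLen v _ hv ?_
      intro p hp
      have hgp : (d.insert (r, c) cl).get? p = some cl := hg p hp
      have hcont : (d.insert (r, c) cl).contains p = true := by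
        rw [PySem.Dict.contains_eq_isSome_get?, hgp]
        rfl
      exact (PySem.Dict.contains_iff_mem_keys _ _).mp hcont
    have hgs0 : pvGoodD (d.insert (r, c) cl) cl (r, c) := PySem.Dict.get?_insert_self _ _ _
    have hdfs := pvDfsLoop_spec n (d.insert (r, c) cl) cl (fun p => p = (r, c))
      ((d.insert (r, c) cl).keys.length) hcard (decide (cl = "B")) rfl
      (M + 1) [(r, c)] [(r, c)] false false
      (by simp) (by simp) (fun p hp => hp)
      (by intro p hp; rw [List.eq_of_mem_singleton hp]; exact hgs0)
      (by intro p hp; exact pvReach.base p (List.eq_of_mem_singleton hp))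
      (by intro p hp; rw [hp]; simp)
      (by intro p hp hnp; exact absurd hp hnp)
      (by simp) (by simp)
      (by
        rw [hkeys']
        simp only [List.length_cons, List.length_nil, List.length_append]
        simp only [List.length_cons] at hM
        omega)
    have hRP : ∀ x, pvReach (pvGoodD (d.insert (r, c) cl) cl) (fun p => p = (r, c)) x ↔
        pvP (pvGoodD (d.insert (r, c) cl) cl) (r, c) x := by
      intro x
      rw [pvReach_iff (fun p hp => by rw [hp]; exact hgs0)]
      constructor
      · rintro ⟨sp, rfl, h⟩
        exact h
      · intro h
        exact ⟨(r, c), rfl, h⟩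
    have hprior : ¬ pvConn n (decide (cl = "B")) (pvGoodD d cl) := by
      rcases hcolor with h | h <;> rw [h]
      · rw [show decide (("B" : String) = "B") = true from by decide]
        exact hB
      · rw [show decide (("W" : String) = "B") = false from by decide]
        exact hW
    have hcore := pvConn_insert_iff n (decide (cl = "B")) d (r, c) cl hfrc hprior
    have hflag : pvHasConnection n (pvASet board r c (some cl)) cl =
        ((pvDfsLoop n (d.insert (r, c) cl) cl (M + 1)
            (PySem.Set.add PySem.Set.empty (r, c)) [(r, c)] false false).1 &&
         (pvDfsLoop n (d.insert (r, c) cl) cl (M + 1)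
            (PySem.Set.add PySem.Set.empty (r, c)) [(r, c)] false false).2) := by
      apply pvBoolEq
      rw [show PySem.Set.add PySem.Set.empty ((r : Int), (c : Int)) = [(r, c)] from rfl]
      rw [pvHasConnection_iff n _ cl hcolor, pvConn_congr hGoodIff, hcore,
        Bool.and_eq_true, hdfs.1, hdfs.2]
      simp only [hRP]
    rw [show PySem.Set.add PySem.Set.empty ((r : Int), (c : Int)) = [(r, c)] from rfl] at hflag ⊢
    rw [hflag]
    by_cases hX : ((pvDfsLoop n (d.insert (r, c) cl) cl (M + 1) [(r, c)] [(r, c)] false false).1 &&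
        (pvDfsLoop n (d.insert (r, c) cl) cl (M + 1) [(r, c)] [(r, c)] false false).2) = true
    · rw [if_pos hX, if_pos hX]
    · rw [if_neg hX, if_neg hX]
      -- no win yet: recurse, re-establishing every invariant
      have hnoconn_cl : ¬ pvConn n (decide (cl = "B")) (pvGoodD (d.insert (r, c) cl) cl) := by
        intro hcn
        obtain ⟨hA1, hA2⟩ := hcore.mp hcn
        apply hX
        rw [Bool.and_eq_true, hdfs.1, hdfs.2]
        simp only [hRP]
        exact ⟨hA1, hA2⟩
      -- the opponent's stones are unchanged by this move
      have hother : ∀ oc : String, oc ≠ cl →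
          (∀ p : Int × Int, pvGoodD d oc p ↔ pvGoodD (d.insert (r, c) cl) oc p) := by
        intro oc hoc p
        unfold pvGoodD
        rw [PySem.Dict.get?_insert]
        by_cases he : p = (r, c)
        · rw [if_pos he, he, hfrc]
          constructor
          · intro h; cases h
          · intro h
            cases h
            exact absurd rfl hoc
        · rw [if_neg he]
      have hfresh' : ∀ p ∈ rest, (d.insert (r, c) cl).get? p = none := by
        intro p hp
        rw [PySem.Dict.get?_insert, if_neg (by
          rintro rfl
          exact (List.nodup_cons.mp hnd).1 hp)]
        exact hfresh p (by simp [hp])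
      have hM' : (d.insert (r, c) cl).keys.length + rest.length ≤ M := by
        rw [hkeys']
        simp only [List.length_append, List.length_singleton]
        simp only [List.length_cons] at hM
        omega
      have hB' : ¬ pvConn n true (pvGoodD (d.insert (r, c) cl) "B") := by
        rcases hcolor with hc2 | hc2
        · have h2 := hnoconn_cl
          rw [show decide (cl = "B") = true from by rw [hc2]; decide] at h2
          rw [← hc2]
          exact h2
        · rw [← pvConn_congr (hother "B" (by rw [hc2]; decide))]
          exact hB
      have hW' : ¬ pvConn n false (pvGoodD (d.insert (r, c) cl) "W") := by
        rcases hcolor with hc2 | hc2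
        · rw [← pvConn_congr (hother "W" (by rw [hc2]; decide))]
          exact hW
        · have h2 := hnoconn_cl
          rw [show decide (cl = "B") = false from by rw [hc2]; decide] at h2
          rw [← hc2]
          exact h2
      exact ih (pvASet board r c (some cl)) (d.insert (r, c) cl) (i + 1) hwf' hrel' hkb'
        (List.nodup_cons.mp hnd).2 (fun p hp => hbnds p (by simp [hp])) hfresh' hknd' hM' hB' hW'

-- ===== VERDICT (by name: the statement is the Claim_ definition above) =====
theorem earliest_win_bfs_spec : Claim_equal_earliest_win_bfs := by
  intro n moves _hdom hpre
  unfold Spec_earliest_win_bfs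
  obtain ⟨hnd, hbnds⟩ := hpre
  have hbnds' : ∀ p ∈ moves, pvInBounds n p.1 p.2 = true := by
    intro p hp
    simp only [pvInBounds, decide_eq_true_eq]
    exact hbnds p hp
  have hB0 : ¬ pvConn n true (pvGoodD PySem.Dict.empty "B") := by
    rintro ⟨sp, x, -, -, hp⟩
    have hg := pvP_good_left hp
    unfold pvGoodD at hg
    rw [PySem.Dict.get?_empty] at hg
    cases hg
  have hW0 : ¬ pvConn n false (pvGoodD PySem.Dict.empty "W") := by
    rintro ⟨sp, x, -, -, hp⟩
    have hg := pvP_good_left hp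
    unfold pvGoodD at hg
    rw [PySem.Dict.get?_empty] at hg
    cases hg
  unfold earliest_win_bfs earliest_win_bfs_alt
  rw [if_pos (pvValid_true n moves PySem.Set.empty hnd hbnds'
    (fun p _ => List.not_mem_nil))]
  exact pvLoop_eq n moves.length moves _ PySem.Dict.empty 1 (pvWF_init n)
    (fun rr cc _ => by rw [pvAGet_init, PySem.Dict.get?_empty])
    (fun rr cc v h => by rw [PySem.Dict.get?_empty] at h; cases h)
    hnd hbnds' (fun p _ => PySem.Dict.get?_empty p)
    PySem.Dict.nodup_keys_empty
    (by rw [PySem.Dict.keys_empty]; simp)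
    hB0 hW0
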